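-- pv_equiv track=rewrite | github.com/Ohjinn/algo-py | 11st/problem1.py | solution
-- ===== SOURCE A (Python) =====
-- from collections import deque
--
-- def solution(S):
--     deq = deque(S)
--     count = 0
--     for i in range(len(deq)):
--         if deq[0] == deq[-1]:
--             count += 1
--         deq.rotate(-1)
--
--     return count
-- ===== SOURCE B (Python) =====
-- def solution(S):
--     lst = list(S)
--     return sum(1 for x, y in zip(lst, lst[1:] + lst[:1]) if x == y)
-- ===== Notes on version B (the rewrite author's own statement) =====
-- stated objective: simpler
-- what changed: Replaces the deque that is rotated n times (comparing both ends each step) with a single comprehension counting equal components of zip(lst, lst[1:]+lst[:1]), i.e. one element-wise pass against the left-rotated copy.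
import Mathlib
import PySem

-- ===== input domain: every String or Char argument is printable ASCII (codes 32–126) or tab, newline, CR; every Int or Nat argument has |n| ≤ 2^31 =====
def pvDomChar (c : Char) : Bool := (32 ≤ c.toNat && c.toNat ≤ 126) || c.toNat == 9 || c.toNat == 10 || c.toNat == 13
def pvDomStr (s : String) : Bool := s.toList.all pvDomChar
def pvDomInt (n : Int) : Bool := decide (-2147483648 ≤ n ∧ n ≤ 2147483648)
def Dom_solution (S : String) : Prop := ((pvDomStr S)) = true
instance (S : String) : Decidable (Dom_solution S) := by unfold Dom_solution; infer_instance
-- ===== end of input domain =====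

-- B replaces A's n-fold deque rotation with one zip of the list against its left rotation; same O(n) cost, simpler shape.

-- ===== PORT A =====
-- 'for i in range(len(deq))' with unused i: fuel recursion over the iteration count.
-- deq.rotate(-1) on a deque = drop 1 ++ take 1 (front element moves to the back).
def solLoopA : Nat → List Char → Int → Int
  | 0, _, c => c
  | k+1, deq, c =>
    let c' := if PySem.List.pyGet? deq 0 = PySem.List.pyGet? deq (-1) then c + 1 else c
    solLoopA k (deq.drop 1 ++ deq.take 1) c'

def solution (S : String) : Int :=
  let deq := S.toList
  solLoopA deq.length deq 0

-- ===== PORT B =====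
def solution_alt (S : String) : Int :=
  let lst := S.toList
  (lst.zip (PySem.List.slice lst (some 1) none ++ PySem.List.slice lst none (some 1))).foldl
    (fun acc p => if p.1 = p.2 then acc + 1 else acc) 0

-- ===== PRECONDITION & SPEC =====
def Spec_solution (S : String) (out : Int) : Prop := out = solution_alt S
instance (S : String) (out : Int) : Decidable (Spec_solution S out) := by unfold Spec_solution; infer_instance

-- ===== CLAIM (what is proved, stated in full; the proofs are below) =====
def Claim_equal_solution : Prop := ∀ (S : String), Dom_solution S → Spec_solution S (solution S)

-- ===== LEMMAS AND PROOFS =====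

-- number of equal adjacent pairs (non-cyclic)
def adjEq : List Char → Int
  | [] => 0
  | [_] => 0
  | a :: b :: t => (if a = b then 1 else 0) + adjEq (b :: t)

theorem solLoopA_eq (u : List Char) (hu : u ≠ []) :
    ∀ (v : List Char) (c : Int),
      solLoopA u.length (u ++ v) c =
        c + (if u.head? = (u ++ v).getLast? then 1 else 0) + adjEq u := by
  induction u with
  | nil => exact absurd rfl hu
  | cons a t ih =>
    intro v c
    cases t with
    | nil =>
      simp only [List.length_cons, List.length_nil, solLoopA, List.cons_append, List.nil_append,
        PySem.List.pyGet?_zero_cons, PySem.List.pyGet?_neg_one, adjEq, List.head?_cons]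
      split_ifs <;> ring
    | cons b t' =>
      have step :
          solLoopA (a :: b :: t').length ((a :: b :: t') ++ v) c =
            solLoopA (b :: t').length ((b :: t') ++ (v ++ [a]))
              (if (a :: b :: t').head? = ((a :: b :: t') ++ v).getLast? then c + 1 else c) := by
        simp only [List.length_cons, solLoopA, List.cons_append,
          PySem.List.pyGet?_zero_cons, PySem.List.pyGet?_neg_one, List.head?_cons]
        simp [List.append_assoc]
      rw [step, ih (by simp) (v ++ [a])]
      have hlast : ((b :: t') ++ (v ++ [a])).getLast? = some a := by
        rw [← List.append_assoc]
        exact List.getLast?_concat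
      have hlast2 : ((a :: b :: t') ++ v).getLast? = ((b :: t') ++ v).getLast? := by
        simp
      rw [hlast, hlast2]
      simp only [adjEq, List.head?_cons, Option.some.injEq]
      split_ifs <;> try ring
      all_goals (rename_i hx hy; first | exact absurd hx.symm hy | exact absurd hy.symm hx)

theorem zipFold_eq (t : List Char) :
    ∀ (a z : Char) (c : Int),
      ((a :: t).zip (t ++ [z])).foldl (fun acc p => if p.1 = p.2 then acc + 1 else acc) c =
        c + adjEq (a :: t) + (if (a :: t).getLast? = some z then 1 else 0) := by
  induction t with
  | nil =>
    intro a z c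
    simp only [List.nil_append, List.zip_cons_cons, List.zip_nil_left, List.foldl_cons,
      List.foldl_nil, adjEq, List.getLast?_singleton, Option.some.injEq]
    split_ifs <;> ring
  | cons b t' ih =>
    intro a z c
    simp only [List.cons_append, List.zip_cons_cons, List.foldl_cons]
    rw [ih b z]
    simp only [adjEq]
    have hlast : (a :: b :: t').getLast? = (b :: t').getLast? := by
      simp [List.getLast?_cons_cons]
    rw [hlast]
    split_ifs <;> ring

theorem solution_eq_alt (S : String) : solution S = solution_alt S := by
  unfold solution solution_alt
  cases h : S.toList with
  | nil => simp [solLoopA]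
  | cons a t =>
    simp only
    have hA := solLoopA_eq (a :: t) (by simp) [] 0
    rw [List.append_nil] at hA
    rw [hA]
    have hs1 : PySem.List.slice (a :: t) (some 1) none = t := by
      simp [PySem.List.slice_from_one]
    have hs2 : PySem.List.slice (a :: t) none (some 1) = [a] := by
      simp [PySem.List.slice]
    rw [hs1, hs2, zipFold_eq t a a 0]
    split_ifs <;> try ring
    all_goals (rename_i hx hy; rw [List.head?_cons] at hx; first | exact absurd hx.symm hy | exact absurd hy.symm hx)

-- ===== VERDICT (by name: the statement is the Claim_ definition above) =====
theorem solution_spec : Claim_equal_solution := by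
  intro S _
  exact solution_eq_alt S
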